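-- pv_equiv track=rewrite | github.com/Kaarlo-25/IACD-Practica1 | functions.py | kind_of_true_table
-- ===== SOURCE A (Python) =====
-- def kind_of_true_table(df_last_column):
--     tautologia = all(valor == 1 for valor in df_last_column)
--     contradiccion = all(valor == 0 for valor in df_last_column)
--     if tautologia:
--         return "Tautologia"
--     if contradiccion:
--         return "Contradiccion"
--     else:
--         return "Contingencia"
-- ===== SOURCE B (Python) =====
-- def kind_of_true_table(df_last_column):
--     # Reduce the column to its extremes in one fold; classify from (lo, hi).
--     lo = hi = None
--     for v in df_last_column:
--         lo = v if lo is None or v < lo else lo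
--         hi = v if hi is None or v > hi else hi
--     if lo is None or (lo, hi) == (1, 1):
--         return "Tautologia"
--     if (lo, hi) == (0, 0):
--         return "Contradiccion"
--     return "Contingencia"
-- ===== Notes on version B (the rewrite author's own statement) =====
-- stated objective: alternative
-- what changed: Replaces the two element-wise all() scans with a single fold that maintains the running minimum and maximum of the column and classifies from that extreme pair alone.
import Mathlib
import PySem

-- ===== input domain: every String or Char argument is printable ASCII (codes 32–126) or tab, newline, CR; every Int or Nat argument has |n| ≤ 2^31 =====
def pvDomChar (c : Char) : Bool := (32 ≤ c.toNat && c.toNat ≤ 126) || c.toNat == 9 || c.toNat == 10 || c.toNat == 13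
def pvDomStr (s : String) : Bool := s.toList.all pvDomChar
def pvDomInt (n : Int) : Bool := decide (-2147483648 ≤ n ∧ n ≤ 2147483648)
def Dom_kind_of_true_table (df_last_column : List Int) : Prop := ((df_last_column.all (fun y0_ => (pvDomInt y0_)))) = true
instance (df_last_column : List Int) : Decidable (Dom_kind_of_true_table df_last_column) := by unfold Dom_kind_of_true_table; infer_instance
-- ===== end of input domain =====

-- ===== PORT A =====
-- Header: B folds the column down to its running (min, max) pair and classifies from it (alternative decomposition, same cost).
def kind_of_true_table (df_last_column : List Int) : String :=
  let tautologia := df_last_column.all (fun valor => valor == 1)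
  let contradiccion := df_last_column.all (fun valor => valor == 0)
  if tautologia then "Tautologia"
  else if contradiccion then "Contradiccion"
  else "Contingencia"

-- ===== PORT B =====
-- one fold maintaining Option (lo, hi), as in Source B's loop over (lo, hi) starting from None
def pvMMStep (acc : Option (Int × Int)) (v : Int) : Option (Int × Int) :=
  match acc with
  | none => some (v, v)
  | some (lo, hi) => some ((if v < lo then v else lo), (if v > hi then v else hi))

def kind_of_true_table_alt (df_last_column : List Int) : String :=
  let mm := df_last_column.foldl pvMMStep none
  match mm with
  | none => "Tautologia"
  | some (lo, hi) =>
    if lo == 1 && hi == 1 then "Tautologia"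
    else if lo == 0 && hi == 0 then "Contradiccion"
    else "Contingencia"

-- ===== PRECONDITION & SPEC =====
def Spec_kind_of_true_table (df_last_column : List Int) (out : String) : Prop := out = kind_of_true_table_alt df_last_column
instance (df_last_column : List Int) (out : String) : Decidable (Spec_kind_of_true_table df_last_column out) := by unfold Spec_kind_of_true_table; infer_instance

-- ===== CLAIM (what is proved, stated in full; the proofs are below) =====
def Claim_equal_kind_of_true_table : Prop := ∀ (df_last_column : List Int), Dom_kind_of_true_table df_last_column → Spec_kind_of_true_table df_last_column (kind_of_true_table df_last_column)

-- ===== LEMMAS AND PROOFS =====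
theorem pvMM_char (xs : List Int) (lo hi : Int) (hle : lo ≤ hi) :
    ∃ lo' hi', xs.foldl pvMMStep (some (lo, hi)) = some (lo', hi') ∧ lo' ≤ hi' ∧
      (∀ a : Int, (lo' = a ∧ hi' = a) ↔ (lo = a ∧ hi = a ∧ xs.all (fun v => v == a) = true)) := by
  induction xs generalizing lo hi with
  | nil => exact ⟨lo, hi, rfl, hle, fun a => by simp⟩
  | cons v t ih =>
    have hle2 : (if v < lo then v else lo) ≤ (if v > hi then v else hi) := by
      split_ifs <;> omega
    obtain ⟨lo', hi', hfold, hle', hch⟩ := ih (if v < lo then v else lo) (if v > hi then v else hi) hle2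
    refine ⟨lo', hi', by simpa [pvMMStep] using hfold, hle', fun a => ?_⟩
    rw [hch a]
    simp only [List.all_cons, Bool.and_eq_true, beq_iff_eq]
    constructor
    · rintro ⟨h1, h2, h3⟩
      refine ⟨by split_ifs at h1 h2 <;> omega, by split_ifs at h1 h2 <;> omega,
        by split_ifs at h1 h2 <;> omega, h3⟩
    · rintro ⟨h1, h2, h3, h4⟩
      refine ⟨by split_ifs <;> omega, by split_ifs <;> omega, h4⟩

-- ===== VERDICT (by name: the statement is the Claim_ definition above) =====
theorem kind_of_true_table_spec : Claim_equal_kind_of_true_table := by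
  intro xs _
  unfold Spec_kind_of_true_table kind_of_true_table kind_of_true_table_alt
  cases xs with
  | nil => rfl
  | cons v t =>
    obtain ⟨lo', hi', hfold, hle', hch⟩ := pvMM_char t v v le_rfl
    have e : ∀ a : Int, ((lo' == a) && (hi' == a)) = ((v == a) && t.all (fun x => x == a)) := by
      intro a
      apply Bool.eq_iff_iff.mpr
      simp only [Bool.and_eq_true, beq_iff_eq]
      constructor
      · intro h
        have := (hch a).mp ⟨h.1, h.2⟩
        exact ⟨this.1, this.2.2⟩
      · intro h
        have := (hch a).mpr ⟨h.1, h.1, h.2⟩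
        exact ⟨this.1, this.2⟩
    simp only [List.foldl_cons, pvMMStep, hfold, List.all_cons, ← e 1, ← e 0]
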